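-- pv_equiv track=rewrite | github.com/AustinTSchaffer/DailyProgrammer | AdventOfCode/2025/src/aoc2025/day_06.py | part_1
-- ===== SOURCE A (Python) =====
-- Input = tuple[list[list[int]], list[list[int]], list[str]]
--
-- def part_1(input: Input):
--     values_part_1, _, operators = input
--
--     acc = values_part_1[0].copy()
--     for values in values_part_1[1:]:
--         for idx, (acc_val, val, op) in enumerate(zip(acc, values, operators)):
--             acc[idx] = (
--                 acc_val + val
--                 if op == "+" else
--                 acc_val * val
--             )
--     return sum(acc)
-- ===== SOURCE B (Python) =====
-- def part_1(input):
--     rows, _, ops = input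
--     first = rows[0]
--     rest = rows[1:]
--     k = min(len(first), len(ops))
--     plus = {i for i in range(k) if ops[i] == "+"}
--     # additive pass: row 0 entirely, plus every later-row entry that lands in a '+' column
--     total = sum(first)
--     for r in rest:
--         for i, x in enumerate(r[:k]):
--             if i in plus:
--                 total += x
--     # multiplicative columns: swap the additive seed first[i] for the column product
--     for i in range(k):
--         if i not in plus:
--             p = first[i]
--             for r in rest:
--                 if i < len(r):
--                     p *= r[i]
--             total += p - first[i]
--     return total
-- ===== Notes on version B (the rewrite author's own statement) =====
-- stated objective: alternative
-- what changed: Exploits that each column's operator is fixed: B precomputes the set of '+' columns, accumulates all additive contributions in one aggregate row-major sum pass (sum(first) plus every later-row entry falling in a '+' column), and then handles only the '*' columns individually, replacing their additive seed by the column product via a correction term; A instead maintains an evolving accumulator list updated per row with a per-element operator branch.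
import Mathlib
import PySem

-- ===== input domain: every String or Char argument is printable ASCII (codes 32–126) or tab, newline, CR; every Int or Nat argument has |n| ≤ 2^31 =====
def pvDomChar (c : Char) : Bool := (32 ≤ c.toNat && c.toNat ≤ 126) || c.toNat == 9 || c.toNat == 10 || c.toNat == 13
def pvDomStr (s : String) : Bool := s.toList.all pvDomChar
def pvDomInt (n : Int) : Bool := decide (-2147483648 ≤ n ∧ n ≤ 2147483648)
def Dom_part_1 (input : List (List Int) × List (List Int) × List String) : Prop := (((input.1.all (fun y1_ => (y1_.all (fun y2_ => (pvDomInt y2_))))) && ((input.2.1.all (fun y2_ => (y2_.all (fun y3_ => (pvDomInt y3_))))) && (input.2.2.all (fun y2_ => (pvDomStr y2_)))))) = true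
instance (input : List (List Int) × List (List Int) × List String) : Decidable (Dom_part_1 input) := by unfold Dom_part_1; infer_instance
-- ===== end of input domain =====

-- B splits the work by operator kind: one aggregate additive pass (row 0 plus all later-row entries in '+' columns, via a precomputed set of '+' column indices) and a per-column product correction for the remaining columns, instead of A's evolving per-row accumulator; alternative decomposition, same cost. Equivalence of return values on nonempty value-row lists.


-- ===== PORT A =====
-- the inner loop: updates acc[idx] along the zip(acc, values, operators) prefix, leaves the rest of acc
def pvRow : List Int → List Int → List String → List Int
  | a :: as, v :: vs, o :: os =>
      (if o == "+" then a + v else a * v) :: pvRow as vs os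
  | as, _, _ => as

def part_1 (input : List (List Int) × List (List Int) × List String) : Int :=
  let values_part_1 := input.1
  let operators := input.2.2
  -- values_part_1[0].copy(); Python raises IndexError on [], excluded by Pre_
  let acc0 := values_part_1.headD []
  let acc := (values_part_1.drop 1).foldl (fun acc values => pvRow acc values operators) acc0
  acc.sum

-- ===== PORT B =====
-- plus = {i for i in range(k) if ops[i] == "+"}; i < k ≤ len(ops), so ops[i] is in range
def pvPlusSet (ops : List String) (k : Nat) : PySem.Set Int :=
  PySem.Set.ofList ((PySem.List.pyRange 0 (k : Int) 1).filter (fun i => ops.getD i.toNat "" == "+"))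

def part_1_alt (input : List (List Int) × List (List Int) × List String) : Int :=
  let rows := input.1
  let ops := input.2.2
  let first := rows.headD []          -- rows[0]; Python raises IndexError on [], excluded by Pre_
  let rest := rows.drop 1
  let k := min first.length ops.length
  let plus : PySem.Set Int := pvPlusSet ops k
  -- additive pass: total = sum(first); for r in rest: for i, x in enumerate(r[:k]): if i in plus: total += x
  let total := first.sum
  let total := rest.foldl (fun t r =>
      (PySem.List.enumerate (r.take k) 0).foldl
        (fun t p => if plus.contains p.1 then t + p.2 else t) t) total
  -- '*' columns: for i in range(k): if i not in plus: p=first[i]; for r in rest: if i<len(r): p*=r[i]; total += p-first[i]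
  (PySem.List.pyRange 0 (k : Int) 1).foldl
    (fun t i =>
      if plus.contains i then t
      else t + ((rest.foldl (fun p r => if i.toNat < r.length then p * r.getD i.toNat 0 else p)
                  (first.getD i.toNat 0)) - first.getD i.toNat 0)) total

-- ===== PRECONDITION & SPEC =====
-- Pre_ excludes only the empty list of value rows, on which Python A raises IndexError at values_part_1[0] (B raises there too).
def Pre_part_1 (input : List (List Int) × List (List Int) × List String) : Prop := input.1 ≠ []
instance (input : List (List Int) × List (List Int) × List String) : Decidable (Pre_part_1 input) := by unfold Pre_part_1; infer_instance
def pvWitness_part_1 : (List (List Int) × List (List Int) × List String) := ([[1, 2], [3, 4]], [], ["+", "*"])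

def Spec_part_1 (input : List (List Int) × List (List Int) × List String) (out : Int) : Prop := out = part_1_alt input
instance (input : List (List Int) × List (List Int) × List String) (out : Int) : Decidable (Spec_part_1 input out) := by unfold Spec_part_1; infer_instance

-- ===== CLAIM (what is proved, stated in full; the proofs are below) =====
def Claim_equal_part_1 : Prop := ∀ (input : List (List Int) × List (List Int) × List String), Dom_part_1 input → Pre_part_1 input → Spec_part_1 input (part_1 input)

-- ===== LEMMAS AND PROOFS =====

-- ---- common reference: per-column closed forms and range sums ----

-- A's per-column effect: fold a start value through the later rows along the zip guards
def pvCol (rest : List (List Int)) (ops : List String) (idx : Nat) (c : Int) : Int :=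
  rest.foldl (fun c row =>
    if idx < row.length && idx < ops.length then
      (if ops.getD idx "" == "+" then c + row.getD idx 0 else c * row.getD idx 0)
    else c) c

-- sum of A's per-column results, column idx offset by i
def sumCols (rest : List (List Int)) (ops : List String) : List Int → Nat → Int
  | [], _ => 0
  | a :: as, i => pvCol rest ops i a + sumCols rest ops as (i + 1)

-- column sum over the later rows (guarded by row length)
def colS (rest : List (List Int)) (j : Nat) : Int :=
  (rest.map (fun r => if j < r.length then r.getD j 0 else 0)).sum

-- B's inner product fold
def colP (rest : List (List Int)) (j : Nat) (c : Int) : Int :=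
  rest.foldl (fun p r => if j < r.length then p * r.getD j 0 else p) c

-- range sum notation
def rS (n : Nat) (f : Nat → Int) : Int := ((List.range n).map f).sum

-- ---- A-side: part_1 = sumCols ----

theorem length_pvRow (acc v : List Int) (ops : List String) : (pvRow acc v ops).length = acc.length := by
  induction acc generalizing v ops with
  | nil => cases v <;> cases ops <;> simp [pvRow]
  | cons a as ih =>
      cases v with
      | nil => simp [pvRow]
      | cons v0 vs =>
          cases ops with
          | nil => simp [pvRow]
          | cons o os => simp [pvRow, ih]

theorem pvRow_getD (acc v : List Int) (ops : List String) (j : Nat) (hj : j < acc.length) :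
    (pvRow acc v ops).getD j 0 =
      if j < v.length && j < ops.length then
        (if ops.getD j "" == "+" then acc.getD j 0 + v.getD j 0 else acc.getD j 0 * v.getD j 0)
      else acc.getD j 0 := by
  induction acc generalizing v ops j with
  | nil => simp at hj
  | cons a as ih =>
      cases v with
      | nil => simp [pvRow]
      | cons v0 vs =>
          cases ops with
          | nil => simp [pvRow]
          | cons o os =>
              cases j with
              | zero => simp [pvRow]
              | succ j =>
                  simp only [pvRow, List.length_cons, List.getD]
                  have := ih vs os j (by simpa using Nat.lt_of_succ_lt_succ hj)
                  simpa [List.getD, Nat.succ_lt_succ_iff] using this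

theorem pvCol_cons (v : List Int) (rest : List (List Int)) (ops : List String) (j : Nat) (c : Int) :
    pvCol (v :: rest) ops j c =
      pvCol rest ops j
        (if j < v.length && j < ops.length then
          (if ops.getD j "" == "+" then c + v.getD j 0 else c * v.getD j 0)
        else c) := by
  simp [pvCol]

theorem foldl_pvRow_length (rest : List (List Int)) (ops : List String) (acc : List Int) :
    (rest.foldl (fun a v => pvRow a v ops) acc).length = acc.length := by
  induction rest generalizing acc with
  | nil => rfl
  | cons v rest ih => simpa [length_pvRow] using ih (pvRow acc v ops)

theorem foldl_pvRow_getD (rest : List (List Int)) (ops : List String) (acc : List Int)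
    (j : Nat) (hj : j < acc.length) :
    (rest.foldl (fun a v => pvRow a v ops) acc).getD j 0 = pvCol rest ops j (acc.getD j 0) := by
  induction rest generalizing acc with
  | nil => simp [pvCol]
  | cons v rest ih =>
      have h1 : j < (pvRow acc v ops).length := by simpa [length_pvRow] using hj
      calc ((v :: rest).foldl (fun a v => pvRow a v ops) acc).getD j 0
          = (rest.foldl (fun a v => pvRow a v ops) (pvRow acc v ops)).getD j 0 := rfl
        _ = pvCol rest ops j ((pvRow acc v ops).getD j 0) := ih _ h1
        _ = pvCol (v :: rest) ops j (acc.getD j 0) := by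
              rw [pvRow_getD acc v ops j hj, pvCol_cons]

theorem sum_eq_sumCols (rest : List (List Int)) (ops : List String) :
    ∀ (first l : List Int) (i : Nat), l.length = first.length →
      (∀ j, j < first.length → l.getD j 0 = pvCol rest ops (i + j) (first.getD j 0)) →
      l.sum = sumCols rest ops first i := by
  intro first
  induction first with
  | nil =>
      intro l i hl _
      simp at hl
      simp [hl, sumCols]
  | cons a as ih =>
      intro l i hl hpt
      cases l with
      | nil => simp at hl
      | cons b bs =>
          have hb : b = pvCol rest ops i a := by simpa using hpt 0 (by simp)
          have hbs : bs.sum = sumCols rest ops as (i + 1) := by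
            apply ih bs (i + 1) (by simpa using hl)
            intro j hj
            have := hpt (j + 1) (by simpa using Nat.succ_lt_succ hj)
            simpa [Nat.add_assoc, Nat.add_comm 1 j] using this
          simp [sumCols, hb, hbs]

theorem main_eq (rest : List (List Int)) (ops : List String) (first : List Int) :
    (rest.foldl (fun a v => pvRow a v ops) first).sum = sumCols rest ops first 0 := by
  apply sum_eq_sumCols rest ops first _ 0 (foldl_pvRow_length rest ops first)
  intro j hj
  simpa using foldl_pvRow_getD rest ops first j hj

-- ---- per-column closed forms ----

theorem pvCol_out (rest : List (List Int)) (ops : List String) (j : Nat) (c : Int)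
    (h : ops.length ≤ j) : pvCol rest ops j c = c := by
  induction rest generalizing c with
  | nil => rfl
  | cons r rs ih =>
      rw [pvCol_cons]
      have : (j < r.length && j < ops.length) = false := by
        simp [Nat.not_lt.mpr h]
      rw [this]
      exact ih c

theorem pvCol_plus (rest : List (List Int)) (ops : List String) (j : Nat) (c : Int)
    (hj : j < ops.length) (hop : (ops.getD j "" == "+") = true) :
    pvCol rest ops j c = c + colS rest j := by
  induction rest generalizing c with
  | nil => simp [pvCol, colS]
  | cons r rs ih =>
      rw [pvCol_cons]
      by_cases hr : j < r.length
      · simp only [hr, hj, decide_true, Bool.and_self, if_true, hop]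
        rw [ih]
        simp [colS, hr]
        ring
      · simp only [hr, decide_false, Bool.false_and]
        rw [ih]
        simp [colS, hr]

theorem pvCol_mul (rest : List (List Int)) (ops : List String) (j : Nat) (c : Int)
    (hj : j < ops.length) (hop : (ops.getD j "" == "+") = false) :
    pvCol rest ops j c = colP rest j c := by
  induction rest generalizing c with
  | nil => rfl
  | cons r rs ih =>
      rw [pvCol_cons]
      by_cases hr : j < r.length
      · simp only [hr, hj, decide_true, Bool.and_self, if_true, hop, Bool.false_eq_true, if_false]
        rw [ih]
        simp [colP, hr]
      · simp only [hr, decide_false, Bool.false_and]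
        rw [ih]
        simp [colP, hr]

-- ---- rS toolkit ----

theorem rS_add (n : Nat) (f g : Nat → Int) : rS n (fun j => f j + g j) = rS n f + rS n g := by
  simpa [rS] using PySem.List.sum_map_add_int (List.range n) f g

theorem rS_congr (n : Nat) (f g : Nat → Int) (h : ∀ j, j < n → f j = g j) : rS n f = rS n g := by
  unfold rS
  congr 1
  exact List.map_congr_left (fun j hj => h j (List.mem_range.mp hj))

theorem rS_shift (n : Nat) (f : Nat → Int) : rS (n + 1) f = f 0 + rS n (fun j => f (j + 1)) := by
  simp [rS, List.range_succ_eq_map, List.map_map, Function.comp_def]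

theorem rS_getD (xs : List Int) : rS xs.length (fun j => xs.getD j 0) = xs.sum := by
  induction xs with
  | nil => simp [rS]
  | cons a as ih =>
      rw [List.length_cons, rS_shift]
      simp only [List.getD_cons_succ, List.getD_cons_zero, List.sum_cons, ih]

-- shrink a sum whose tail vanishes
theorem rS_shrink (m n : Nat) (f : Nat → Int) (hmn : m ≤ n)
    (h : ∀ j, m ≤ j → j < n → f j = 0) : rS n f = rS m f := by
  obtain ⟨d, rfl⟩ := Nat.exists_eq_add_of_le hmn
  unfold rS
  rw [List.range_add, List.map_append, List.map_map, List.sum_append]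
  have hz : ((List.range d).map (fun x => f (m + x))).sum = 0 := by
    apply List.sum_eq_zero
    intro x hx
    simp only [List.mem_map, List.mem_range] at hx
    obtain ⟨j, hj, rfl⟩ := hx
    exact h (m + j) (Nat.le_add_right _ _) (by omega)
  simpa [Function.comp_def] using hz

theorem rS_zero (n : Nat) : rS n (fun _ => (0:Int)) = 0 := by simp [rS]

-- ---- A-side decomposition into range sums ----

theorem sumCols_rS (rest : List (List Int)) (ops : List String) :
    ∀ (first : List Int) (i : Nat),
      sumCols rest ops first i = rS first.length (fun j => pvCol rest ops (i + j) (first.getD j 0)) := by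
  intro first
  induction first with
  | nil => intro i; simp [sumCols, rS]
  | cons a as ih =>
      intro i
      rw [List.length_cons, rS_shift]
      simp only [sumCols, List.getD_cons_zero, Nat.add_zero, ih (i + 1)]
      congr 1
      apply rS_congr
      intro j hj
      have h1 : i + 1 + j = i + (j + 1) := by omega
      rw [h1, List.getD_cons_succ]

theorem A_eq (rest : List (List Int)) (ops : List String) (first : List Int) :
    sumCols rest ops first 0 = first.sum
      + rS (min first.length ops.length) (fun j => if ops.getD j "" == "+" then colS rest j else 0)
      + rS (min first.length ops.length)
          (fun j => if ops.getD j "" == "+" then 0 else colP rest j (first.getD j 0) - first.getD j 0) := by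
  rw [sumCols_rS]
  rw [rS_congr first.length _
      (fun j => first.getD j 0
        + (if j < ops.length ∧ (ops.getD j "" == "+") = true then colS rest j else 0)
        + (if j < ops.length ∧ (ops.getD j "" == "+") = false then colP rest j (first.getD j 0) - first.getD j 0 else 0))
      (by
        intro j hj
        beta_reduce
        by_cases h1 : j < ops.length
        · cases hb : (ops.getD j "" == "+") with
          | true =>
              rw [Nat.zero_add, pvCol_plus rest ops j _ h1 hb]
              simp [h1]
          | false =>
              rw [Nat.zero_add, pvCol_mul rest ops j _ h1 hb]
              simp [h1]
        · rw [Nat.zero_add, pvCol_out rest ops j _ (Nat.le_of_not_lt h1)]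
          simp [h1])]
  rw [rS_add, rS_add, rS_getD]
  have hk : min first.length ops.length ≤ first.length := Nat.min_le_left _ _
  rw [rS_shrink (min first.length ops.length) first.length _ hk
      (by intro j h1 h2; have : ops.length ≤ j := by omega
          simp [Nat.not_lt.mpr this])]
  rw [rS_shrink (min first.length ops.length) first.length
      (fun j => if j < ops.length ∧ (ops.getD j "" == "+") = false then colP rest j (first.getD j 0) - first.getD j 0 else 0) hk
      (by intro j h1 h2; have : ops.length ≤ j := by omega
          simp [Nat.not_lt.mpr this])]
  congr 1
  · congr 1
    apply rS_congr
    intro j hj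
    have h1 : j < ops.length := by omega
    cases hb : (ops.getD j "" == "+") <;> simp [h1]
  · apply rS_congr
    intro j hj
    have h1 : j < ops.length := by omega
    cases hb : (ops.getD j "" == "+") <;> simp [h1]

-- ---- B-side: set membership, inner additive fold, row contribution, swap, product pass ----

theorem mem_pvPlusSet (ops : List String) (k : Nat) (x : Int) :
    x ∈ pvPlusSet ops k ↔ 0 ≤ x ∧ x < (k : Int) ∧ (ops.getD x.toNat "" == "+") = true := by
  simp [pvPlusSet, PySem.Set.mem_ofList, List.mem_filter, PySem.List.mem_pyRange_one, and_assoc]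

theorem contains_pvPlusSet (ops : List String) (k : Nat) (j : Nat) :
    (pvPlusSet ops k).contains ((j : Nat) : Int) = (decide (j < k) && (ops.getD j "" == "+")) := by
  have hc : (pvPlusSet ops k).contains ((j : Nat) : Int) = decide (((j : Nat) : Int) ∈ pvPlusSet ops k) := by
    simp
  rw [hc]
  by_cases h1 : j < k <;> cases hb : (ops.getD j "" == "+") <;>
    simp [mem_pvPlusSet, h1] <;> simpa using hb

-- recursive form of the inner additive loop's contribution
def pvG (ops : List String) (k : Nat) : List Int → Nat → Int
  | [], _ => 0
  | x :: xs, s => (if s < k ∧ (ops.getD s "" == "+") = true then x else 0) + pvG ops k xs (s + 1)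

theorem inner_foldl_eq (ops : List String) (k : Nat) :
    ∀ (xs : List Int) (s : Nat) (t : Int),
      (PySem.List.enumerate xs ((s : Nat) : Int)).foldl
          (fun t p => if (pvPlusSet ops k).contains p.1 then t + p.2 else t) t
        = t + pvG ops k xs s := by
  intro xs
  induction xs with
  | nil => intro s t; simp [PySem.List.enumerate_nil, pvG]
  | cons x xs ih =>
      intro s t
      rw [PySem.List.enumerate_cons, List.foldl_cons]
      simp only [contains_pvPlusSet]
      have hcast : ((s : Nat) : Int) + 1 = (((s + 1 : Nat)) : Int) := by push_cast; ring
      rw [hcast, ih (s + 1)]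
      by_cases h1 : s < k
      · cases hb : (ops.getD s "" == "+") with
        | true =>
            have hb' : ops[s]?.getD "" = "+" := by simpa using hb
            rw [if_pos (by simp [h1])]
            simp only [pvG]
            rw [if_pos ⟨h1, hb⟩]
            ring
        | false =>
            have hb' : ¬ (ops[s]?.getD "" = "+") := by simpa using hb
            rw [if_neg (by simp)]
            simp only [pvG]
            rw [if_neg (by simp [hb'])]
            ring
      · rw [if_neg (by simp [h1])]
        simp only [pvG]
        rw [if_neg (by simp [h1])]
        ring

theorem pvG_rS (ops : List String) (k : Nat) :
    ∀ (xs : List Int) (s : Nat),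
      pvG ops k xs s
        = rS xs.length (fun j => if s + j < k ∧ (ops.getD (s + j) "" == "+") = true then xs.getD j 0 else 0) := by
  intro xs
  induction xs with
  | nil => intro s; simp [pvG, rS]
  | cons x xs ih =>
      intro s
      rw [List.length_cons, rS_shift]
      simp only [pvG, ih (s + 1), Nat.add_zero, List.getD_cons_zero]
      congr 1
      apply rS_congr
      intro j hj
      have h1 : s + 1 + j = s + (j + 1) := by omega
      rw [h1, List.getD_cons_succ]

theorem row_contrib (ops : List String) (k : Nat) (r : List Int) :
    pvG ops k (r.take k) 0
      = rS k (fun j => if j < r.length then (if ops.getD j "" == "+" then r.getD j 0 else 0) else 0) := by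
  rw [pvG_rS, List.length_take]
  rw [rS_shrink (min k r.length) k
      (fun j => if j < r.length then (if ops.getD j "" == "+" then r.getD j 0 else 0) else 0)
      (Nat.min_le_left _ _)
      (by intro j h1 h2
          have : ¬ j < r.length := by omega
          simp [this])]
  apply rS_congr
  intro j hj
  beta_reduce
  simp only [Nat.zero_add]
  have h1 : j < k := by omega
  have h2 : j < r.length := by omega
  have ht : (r.take k).getD j 0 = r.getD j 0 := by
    simp [List.getD_eq_getElem?_getD, h1]
  cases hb : (ops.getD j "" == "+") <;> simp [h1, h2]

theorem sum_rows (ops : List String) (k : Nat) (rest : List (List Int)) :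
    (rest.map (fun r => rS k
        (fun j => if j < r.length then (if ops.getD j "" == "+" then r.getD j 0 else 0) else 0))).sum
      = rS k (fun j => if ops.getD j "" == "+" then colS rest j else 0) := by
  induction rest with
  | nil =>
      rw [List.map_nil, List.sum_nil]
      rw [rS_congr k _ (fun _ => (0:Int)) (by
        intro j hj
        beta_reduce
        cases hb : (ops.getD j "" == "+") <;> simp [colS])]
      rw [rS_zero]
  | cons r rs ih =>
      rw [List.map_cons, List.sum_cons, ih, ← rS_add]
      apply rS_congr
      intro j hj
      beta_reduce
      cases hb : (ops.getD j "" == "+") <;> by_cases hr : j < r.length <;>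
        simp [colS, hr]

theorem mult_pass (ops : List String) (k : Nat) (first : List Int) (rest : List (List Int)) (total2 : Int) :
    ((PySem.List.pyRange 0 (k : Int) 1).foldl
        (fun t i =>
          if (pvPlusSet ops k).contains i then t
          else t + ((rest.foldl (fun p r => if i.toNat < r.length then p * r.getD i.toNat 0 else p)
                      (first.getD i.toNat 0)) - first.getD i.toNat 0)) total2)
      = total2 + rS k (fun j => if ops.getD j "" == "+" then 0 else colP rest j (first.getD j 0) - first.getD j 0) := by
  have hr : PySem.List.pyRange 0 (k : Int) 1 = (List.range k).map (fun j => ((j : Nat) : Int)) := by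
    simp [PySem.List.pyRange_one]
  rw [hr, List.foldl_map]
  refine Eq.trans (PySem.List.foldl_congr_mem _ _
      (fun t j => t + (if ops.getD j "" == "+" then 0
        else colP rest j (first.getD j 0) - first.getD j 0)) _ ?_) ?_
  · intro acc j hj
    have hk : j < k := List.mem_range.mp hj
    simp only [contains_pvPlusSet, Int.toNat_natCast]
    cases hb : (ops.getD j "" == "+") with
    | true =>
        rw [if_pos (by simp [hk])]
        simp
    | false =>
        rw [if_neg (by simp)]
        simp [colP]
  · exact PySem.List.foldl_add _ _ _

theorem B_eq (input : List (List Int) × List (List Int) × List String) :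
    part_1_alt input
      = (input.1.headD []).sum
        + rS (min (input.1.headD []).length input.2.2.length)
            (fun j => if input.2.2.getD j "" == "+" then colS (input.1.drop 1) j else 0)
        + rS (min (input.1.headD []).length input.2.2.length)
            (fun j => if input.2.2.getD j "" == "+" then 0
              else colP (input.1.drop 1) j ((input.1.headD []).getD j 0) - (input.1.headD []).getD j 0) := by
  unfold part_1_alt
  rw [mult_pass]
  congr 1
  refine Eq.trans (PySem.List.foldl_congr_mem _ _
      (fun t (r : List Int) => t + rS (min (input.1.headD []).length input.2.2.length)
        (fun j => if j < r.length then (if input.2.2.getD j "" == "+" then r.getD j 0 else 0) else 0)) _ ?_) ?_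
  · intro acc r _
    exact (inner_foldl_eq input.2.2 (min (input.1.headD []).length input.2.2.length)
        (r.take (min (input.1.headD []).length input.2.2.length)) 0 acc).trans
      (by rw [row_contrib])
  · rw [PySem.List.foldl_add, sum_rows]

-- ===== VERDICT (by name: the statement is the Claim_ definition above) =====
theorem part_1_spec : Claim_equal_part_1 := by
  intro input _ _
  unfold Spec_part_1
  have hA : part_1 input = sumCols (input.1.drop 1) input.2.2 (input.1.headD []) 0 := by
    simp only [part_1]
    exact main_eq _ _ _
  rw [hA, A_eq, B_eq]
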